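-- pv_equiv track=rewrite | github.com/morten-pedersen/Group-Assignment | directoryExplorer.py | getcommonwords
-- ===== SOURCE A (Python) =====
-- def getcommonwords(dicts):  # Maybe useful for testing to see what the most common words are
-- 	"""
-- 	The function finds the most common words in the given dictionaries and returns a list of the most common ones in desc order.
-- 	:param dicts: a list containing the dictionaries
-- 	:return: a list with the most common words
-- 	"""
-- 	commonWords = []
-- 	commonWordsDictionary = {}
-- 	# finding the frequency of the words in all the dictionaries
-- 	for dict in dicts:
-- 		currentDict = dict
-- 		for key in currentDict:
-- 			word = key
-- 			freq = currentDict.get(key)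
-- 			if commonWordsDictionary.get(word) is not None:
-- 				commonWordsDictionary[word] = freq + commonWordsDictionary.get(word)
-- 			else:
-- 				commonWordsDictionary[word] = freq
--
-- 	while commonWordsDictionary.__len__() > 0:  # finding the most common words and add them to the list.
-- 		mostCommon = max(commonWordsDictionary, key = lambda i: commonWordsDictionary[i])
-- 		commonWords.append(mostCommon)
-- 		commonWordsDictionary.__delitem__(mostCommon)
-- 		if commonWords.__len__() == 4:
-- 			return commonWords
-- 	return commonWords
-- ===== SOURCE B (Python) =====
-- def getcommonwords(dicts):
-- 	merged = {}
-- 	for d in dicts: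
-- 		for w in d:
-- 			merged[w] = merged.get(w, 0) + d[w]
-- 	return sorted(merged, key=lambda w: merged[w], reverse=True)[:4]
-- ===== Notes on version B (the rewrite author's own statement) =====
-- stated objective: simpler
-- what changed: The repeated max-scan-and-delete selection loop is replaced by a single stable descending sort of the merged dict sliced to the first 4 words (ties keep insertion order, matching max's first-encountered choice), and the merge uses dict.get with a default instead of an if/else.
import Mathlib
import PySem

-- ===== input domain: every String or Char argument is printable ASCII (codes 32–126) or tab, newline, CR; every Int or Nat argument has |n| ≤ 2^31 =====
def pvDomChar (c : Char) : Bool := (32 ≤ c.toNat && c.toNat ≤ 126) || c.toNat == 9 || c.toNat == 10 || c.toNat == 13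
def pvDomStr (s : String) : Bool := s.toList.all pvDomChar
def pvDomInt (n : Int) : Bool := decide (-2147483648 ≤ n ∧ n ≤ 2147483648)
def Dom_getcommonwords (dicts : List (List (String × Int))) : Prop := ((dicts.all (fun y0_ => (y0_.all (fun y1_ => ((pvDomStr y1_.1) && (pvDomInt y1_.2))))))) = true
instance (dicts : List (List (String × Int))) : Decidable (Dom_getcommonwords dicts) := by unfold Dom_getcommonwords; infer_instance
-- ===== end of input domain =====

-- B replaces A's repeated max-scan-and-delete selection loop by one stable descending
-- sort of the merged frequency dict sliced to the first 4 words (objective: simpler).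


-- ===== PORT A =====
-- A's merge loop: for dict in dicts: for key in dict: add freq into commonWordsDictionary
-- (currentDict.get(key) is ported as get?; the iterated key is always present, so .get never returns None)
def pvMergeA (dicts : List (List (String × Int))) : PySem.Dict String Int :=
  dicts.foldl (fun cwd dict =>
    let currentDict := dict
    currentDict.foldl (fun cwd kv =>
      let word := kv.1
      let freq := ((PySem.Dict.mk currentDict).get? word).getD 0
      match cwd.get? word with
      | some old => cwd.insert word (freq + old)
      | none => cwd.insert word freq) cwd) PySem.Dict.empty

-- A's while loop: each pass removes one key, so it runs at most `size` times; fuel = size is exact.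
-- (the lambda i: d[i] is ported as getD: i is iterated from d, so d[i] never raises)
def pvLoopA (fuel : Nat) (d : PySem.Dict String Int) (commonWords : List String) : List String :=
  match fuel with
  | 0 => commonWords
  | Nat.succ fuel =>
    if d.items.length > 0 then
      match PySem.List.max? d.keys (fun i => PySem.Dict.getD d i 0) with
      | none => commonWords           -- unreachable: d is nonempty
      | some mostCommon =>
        let commonWords' := commonWords ++ [mostCommon]
        let d' := d.erase mostCommon
        if commonWords'.length = 4 then commonWords'
        else pvLoopA fuel d' commonWords'
    else commonWords

def getcommonwords (dicts : List (List (String × Int))) : List String :=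
  let commonWordsDictionary := pvMergeA dicts
  pvLoopA commonWordsDictionary.items.length commonWordsDictionary []

-- ===== PORT B =====
def pvMergeB (dicts : List (List (String × Int))) : PySem.Dict String Int :=
  dicts.foldl (fun m d =>
    d.foldl (fun m kv =>
      m.insert kv.1 (m.getD kv.1 0 + ((PySem.Dict.mk d).get? kv.1).getD 0)) m) PySem.Dict.empty

def getcommonwords_alt (dicts : List (List (String × Int))) : List String :=
  let merged := pvMergeB dicts
  (PySem.List.sorted merged.keys (fun w => merged.getD w 0) true).take 4

-- ===== PRECONDITION & SPEC =====
def Spec_getcommonwords (dicts : List (List (String × Int))) (out : List String) : Prop := out = getcommonwords_alt dicts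
instance (dicts : List (List (String × Int))) (out : List String) : Decidable (Spec_getcommonwords dicts out) := by unfold Spec_getcommonwords; infer_instance

-- ===== CLAIM (what is proved, stated in full; the proofs are below) =====
def Claim_equal_getcommonwords : Prop := ∀ (dicts : List (List (String × Int))), Dom_getcommonwords dicts → Spec_getcommonwords dicts (getcommonwords dicts)

-- ===== LEMMAS AND PROOFS =====

-- the two merge loops build the same dict (A's if/else with `freq + old` = B's getD-default with `old + freq`)
theorem pvMerge_eq (dicts : List (List (String × Int))) : pvMergeA dicts = pvMergeB dicts := by
  show dicts.foldl (fun cwd dict =>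
      dict.foldl (fun cwd kv =>
        match cwd.get? kv.1 with
        | some old => cwd.insert kv.1 (((PySem.Dict.mk dict).get? kv.1).getD 0 + old)
        | none => cwd.insert kv.1 (((PySem.Dict.mk dict).get? kv.1).getD 0)) cwd) PySem.Dict.empty =
    dicts.foldl (fun m d =>
      d.foldl (fun m kv =>
        m.insert kv.1 (m.getD kv.1 0 + ((PySem.Dict.mk d).get? kv.1).getD 0)) m) PySem.Dict.empty
  apply PySem.List.foldl_congr_mem
  intro acc d _
  apply PySem.List.foldl_congr_mem
  intro c kv _
  cases hg : c.get? kv.1 with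
  | some old => simp [hg, PySem.Dict.getD_eq_get?_getD, Int.add_comm]
  | none => simp [hg, PySem.Dict.getD_eq_get?_getD]

theorem pv_insertBy_cons {α : Type} (p : α → α → Bool) (x y : α) (ys : List α) :
    PySem.List.insertBy p x (y :: ys) = if p x y then x :: y :: ys else y :: PySem.List.insertBy p x ys := rfl

theorem pv_max?_append_singleton (xs : List String) (x : String) (v : String → Int) :
    PySem.List.max? (xs ++ [x]) v =
      some (match PySem.List.max? xs v with
            | none => x
            | some m => if v m < v x then x else m) := by
  cases hm : PySem.List.max? xs v with
  | none =>
    have : xs = [] := (PySem.List.max?_eq_none_iff xs v).mp hm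
    subst this; rfl
  | some m =>
    simp only [PySem.List.max?] at hm ⊢
    rw [List.foldl_append, hm]
    simp only [List.foldl_cons, List.foldl_nil]
    split <;> rfl

theorem pv_sorted_append_singleton (xs : List String) (x : String) (v : String → Int) :
    PySem.List.sorted (xs ++ [x]) v true =
      PySem.List.insertBy (fun a b => decide (v b < v a)) x (PySem.List.sorted xs v true) := by
  rw [PySem.List.sorted_rev_eq_foldl_insertBy, PySem.List.sorted_rev_eq_foldl_insertBy,
    List.foldl_append]
  rfl

-- congruence: insertBy and sorted only look at the key values of members
theorem pv_insertBy_congr (x : String) (ys : List String) (v v' : String → Int)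
    (hx : v x = v' x) (h : ∀ y ∈ ys, v y = v' y) :
    PySem.List.insertBy (fun a b => decide (v b < v a)) x ys =
      PySem.List.insertBy (fun a b => decide (v' b < v' a)) x ys := by
  induction ys with
  | nil => rfl
  | cons y ys ih =>
    rw [pv_insertBy_cons, pv_insertBy_cons, h y (by simp), hx,
      ih (fun z hz => h z (by simp [hz]))]

theorem pv_sorted_congr (xs : List String) (v v' : String → Int) (h : ∀ x ∈ xs, v x = v' x) :
    PySem.List.sorted xs v true = PySem.List.sorted xs v' true := by
  induction xs using List.reverseRecOn with
  | nil => rfl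
  | append_singleton xs x ih =>
    rw [pv_sorted_append_singleton, pv_sorted_append_singleton,
      pv_insertBy_congr x _ v v' (h x (by simp))
        (fun y hy => h y (List.mem_append_left _ ((PySem.List.mem_sorted _ _ _ _).mp hy))),
      ih (fun z hz => h z (by simp [hz]))]

-- crux: the head of a stable descending sort is the FIRST maximal element (what max picks),
-- and its tail is the stable descending sort of the rest
theorem pv_sortedRev_max_cons (xs : List String) (v : String → Int) (hnd : xs.Nodup)
    (m : String) (hm : PySem.List.max? xs v = some m) :
    PySem.List.sorted xs v true = m :: PySem.List.sorted (xs.filter (fun y => !(y == m))) v true := by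
  induction xs using List.reverseRecOn generalizing m with
  | nil => simp [PySem.List.max?] at hm
  | append_singleton xs x ih =>
    have hnd' : xs.Nodup := hnd.of_append_left
    have hx : x ∉ xs := by
      intro hmem
      exact (List.disjoint_of_nodup_append hnd) hmem (by simp)
    rw [pv_max?_append_singleton] at hm
    cases h0 : PySem.List.max? xs v with
    | none =>
      have hxs : xs = [] := (PySem.List.max?_eq_none_iff xs v).mp h0
      subst hxs
      rw [h0] at hm
      obtain rfl : x = m := by simpa using hm
      simp [PySem.List.sorted, PySem.List.insertBy]
    | some m₀ =>
      rw [h0] at hm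
      have hm₀ : m₀ ∈ xs := PySem.List.max?_mem h0
      have IH := ih hnd' m₀ h0
      rw [pv_sorted_append_singleton, IH]
      by_cases hlt : v m₀ < v x
      · obtain rfl : x = m := by simpa [hlt] using hm
        rw [pv_insertBy_cons]
        simp only [hlt, decide_true, if_pos]
        rw [← IH]
        have hfx : xs.filter (fun y => !(y == x)) = xs :=
          List.filter_eq_self.mpr (fun a ha => by
            simp only [Bool.not_eq_eq_eq_not, Bool.not_true, beq_eq_false_iff_ne, ne_eq]
            exact fun e => hx (e ▸ ha))
        rw [List.filter_append, hfx]
        simp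
      · obtain rfl : m₀ = m := by simpa [hlt] using hm
        rw [pv_insertBy_cons]
        simp only [hlt, decide_false, if_neg, Bool.false_eq_true, not_false_iff]
        have hxm : ¬ (x = m₀) := fun e => hx (e ▸ hm₀)
        rw [List.filter_append]
        have : [x].filter (fun y => !(y == m₀)) = [x] := by simp [hxm]
        rw [this, pv_sorted_append_singleton]

-- Dict.erase facts
theorem pv_find?_filter_ne (l : List (String × Int)) (k w : String) (h : w ≠ k) :
    (l.filter (fun p => !(p.1 == k))).find? (fun p => p.1 == w) = l.find? (fun p => p.1 == w) := by
  induction l with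
  | nil => rfl
  | cons p l ih =>
    by_cases hp : p.1 = k
    · simp [hp, Ne.symm h, ih]
    · by_cases hw : p.1 = w <;> simp [hp, hw, h, ih]

theorem pv_keys_erase (d : PySem.Dict String Int) (k : String) :
    (d.erase k).keys = d.keys.filter (fun y => !(y == k)) := by
  show (d.items.filter _).map _ = (d.items.map _).filter _
  induction d.items with
  | nil => rfl
  | cons p l ih =>
    by_cases h : p.1 = k <;> simp [h, ih]

theorem pv_getD_erase_of_ne (d : PySem.Dict String Int) (k w : String) (h : w ≠ k) :
    (d.erase k).getD w 0 = d.getD w 0 := by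
  rw [PySem.Dict.getD_eq_get?_getD, PySem.Dict.getD_eq_get?_getD]
  show ((((d.items.filter _).find? _).map _).getD 0) = _
  rw [pv_find?_filter_ne d.items k w h]
  rfl

-- the while loop returns the first 4 words of the stable descending sort
theorem pv_loopA_eq_take (fuel : Nat) (d : PySem.Dict String Int) (acc : List String)
    (hnd : d.keys.Nodup) (hfuel : d.items.length = fuel) (hacc : acc.length < 4) :
    pvLoopA fuel d acc =
      acc ++ (PySem.List.sorted d.keys (fun w => d.getD w 0) true).take (4 - acc.length) := by
  induction fuel generalizing d acc with
  | zero =>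
    have : d.items = [] := List.length_eq_zero_iff.mp hfuel
    have hk : d.keys = [] := by simp [PySem.Dict.keys, this]
    simp [pvLoopA, hk, PySem.List.sorted]
  | succ fuel ih =>
    have hpos : d.items.length > 0 := by omega
    have hklen : d.keys.length = fuel + 1 := by simp [PySem.Dict.keys, hfuel]
    have hkne : d.keys ≠ [] := by intro e; rw [e] at hklen; simp at hklen
    cases hm : PySem.List.max? d.keys (fun i => PySem.Dict.getD d i 0) with
    | none => exact absurd ((PySem.List.max?_eq_none_iff _ _).mp hm) hkne
    | some m =>
      have hmem : m ∈ d.keys := PySem.List.max?_mem hm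
      have hL := pv_sortedRev_max_cons d.keys (fun w => d.getD w 0) hnd m hm
      have hkeys' : (d.erase m).keys = d.keys.filter (fun y => !(y == m)) := pv_keys_erase d m
      have hfilter : d.keys.filter (fun y => !(y == m)) = d.keys.erase m :=
        (List.Nodup.erase_eq_filter hnd m).symm
      have hlen' : (d.erase m).items.length = fuel := by
        have h1 : (d.erase m).keys.length = (d.erase m).items.length := by
          simp [PySem.Dict.keys]
        have h2 : (d.keys.erase m).length = d.keys.length - 1 := List.length_erase_of_mem hmem
        rw [hkeys', hfilter] at h1
        omega
      have hnd' : (d.erase m).keys.Nodup := by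
        rw [hkeys', hfilter]; exact hnd.erase m
      have hagree : ∀ w ∈ (d.erase m).keys, (d.erase m).getD w 0 = d.getD w 0 := by
        intro w hw
        rw [hkeys'] at hw
        have := List.of_mem_filter hw
        exact pv_getD_erase_of_ne d m w (by simpa using this)
      by_cases hacc4 : acc.length + 1 = 4
      · have htake : 4 - acc.length = 1 := by omega
        simp only [pvLoopA, if_pos hpos, hm, List.length_append, List.length_cons,
          List.length_nil, Nat.zero_add, if_pos hacc4, htake, hL, List.take_succ_cons,
          List.take_zero]
      · have hrec := ih (d.erase m) (acc ++ [m]) hnd' hlen' (by simp; omega)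
        simp only [pvLoopA, if_pos hpos, hm, List.length_append, List.length_cons,
          List.length_nil, Nat.zero_add, if_neg hacc4]
        rw [hrec, pv_sorted_congr _ _ _ hagree, hkeys',
          pv_sorted_congr _ _ _ (fun w hw => rfl), hL]
        have : 4 - acc.length = (4 - (acc.length + 1)) + 1 := by omega
        rw [this, List.take_succ_cons]
        simp

theorem pv_merged_nodup (dicts : List (List (String × Int))) : (pvMergeB dicts).keys.Nodup := by
  unfold pvMergeB
  suffices H : ∀ (ds : List (List (String × Int))) (m : PySem.Dict String Int), m.keys.Nodup →
      (ds.foldl (fun m d =>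
        d.foldl (fun m kv =>
          m.insert kv.1 (m.getD kv.1 0 + ((PySem.Dict.mk d).get? kv.1).getD 0)) m) m).keys.Nodup from
    H dicts PySem.Dict.empty PySem.Dict.nodup_keys_empty
  intro ds
  induction ds with
  | nil => intro m h; exact h
  | cons d ds ih =>
    intro m h
    exact ih _ (PySem.Dict.nodup_keys_foldl_insert_key d Prod.fst _ m h)

-- ===== VERDICT (by name: the statement is the Claim_ definition above) =====
theorem getcommonwords_spec : Claim_equal_getcommonwords := by
  intro dicts _
  unfold Spec_getcommonwords getcommonwords getcommonwords_alt
  rw [pvMerge_eq]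
  exact pv_loopA_eq_take _ _ [] (pv_merged_nodup dicts) rfl (by simp)
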